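-- pv_equiv track=rewrite | github.com/yeon-kk/algorithm-study-3rd | baekjoon/Implementation/16926.py | setOutline
-- ===== SOURCE A (Python) =====
-- def setOutline(x, m,n,startRow,startCol, items, startIdx):
--     itemLength = len(items)
--     startIdx %= itemLength
--     row, col = startRow, startCol
--     for _ in range(0, m, 1):
--         col += 1
--         x[row][col] = items[startIdx]
--         startIdx = (startIdx+1)  % itemLength
--     if n == 1:
--         return x
--     for _ in range(1, n, 1):
--         row += 1
--         x[row][col] = items[startIdx]
--         startIdx = (startIdx+1)  % itemLength
--     for _ in range(1, m, 1):
--         col -= 1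
--         x[row][col] = items[startIdx]
--         startIdx = (startIdx+1)  % itemLength
--     for _ in range(1, n - 1, 1):
--         row -= 1
--         x[row][col] = items[startIdx]
--         startIdx = (startIdx+1)  % itemLength
--     return x
-- ===== SOURCE B (Python) =====
-- def setOutline(x, m, n, startRow, startCol, items, startIdx):
--     # closed-form addressing: the k-th outline cell and its item index are
--     # computed directly from k (no walked (row, col, idx) state);
--     # mutates x in place like the original
--     startIdx %= len(items)
--     L0, L1, L2, L3 = max(m, 0), max(n - 1, 0), max(m - 1, 0), max(n - 2, 0)
--     total = L0 if n == 1 else L0 + L1 + L2 + L3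
--     for k in range(total):
--         if k < L0:
--             r, c = startRow, startCol + 1 + k
--         elif k < L0 + L1:
--             r, c = startRow + (k - L0) + 1, startCol + L0
--         elif k < L0 + L1 + L2:
--             r, c = startRow + L1, startCol + L0 - (k - L0 - L1) - 1
--         else:
--             r, c = startRow + L1 - (k - L0 - L1 - L2) - 1, startCol + L0 - L2
--         x[r][c] = items[(startIdx + k) % len(items)]
--     return x
-- ===== Notes on version B (the rewrite author's own statement) =====
-- stated objective: alternative
-- what changed: A's stateful walk (mutable row/col cursor and a carried modular item index threaded through four loops) is replaced by closed-form addressing: one loop over k in range(total) that computes the k-th outline cell's coordinates and item index (startIdx+k) % len(items) directly from k by interval arithmetic, with no walked state.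
import Mathlib
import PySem

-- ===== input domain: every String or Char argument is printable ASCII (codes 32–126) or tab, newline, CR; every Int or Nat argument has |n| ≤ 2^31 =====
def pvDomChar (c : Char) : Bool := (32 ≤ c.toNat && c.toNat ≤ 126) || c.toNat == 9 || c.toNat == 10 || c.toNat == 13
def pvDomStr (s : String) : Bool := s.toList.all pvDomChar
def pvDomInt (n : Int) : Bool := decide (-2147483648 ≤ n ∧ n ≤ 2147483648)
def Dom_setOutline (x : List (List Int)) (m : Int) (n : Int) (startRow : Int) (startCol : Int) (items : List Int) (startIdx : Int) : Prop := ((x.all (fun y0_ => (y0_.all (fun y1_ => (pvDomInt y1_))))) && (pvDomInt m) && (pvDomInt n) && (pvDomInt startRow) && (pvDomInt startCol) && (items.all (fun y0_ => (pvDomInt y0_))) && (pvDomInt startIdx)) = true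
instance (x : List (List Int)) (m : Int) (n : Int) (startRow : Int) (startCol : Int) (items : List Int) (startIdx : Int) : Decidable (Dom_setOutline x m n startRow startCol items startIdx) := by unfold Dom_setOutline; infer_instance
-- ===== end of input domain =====

-- B replaces A's stateful walk (mutable row/col cursor plus a carried modular
-- item index) by closed-form addressing: one loop over k that computes the
-- k-th outline cell's coordinates and item index (startIdx+k) % len(items)
-- directly from k (a different algorithm of the same cost, not faster).
-- Both Pythons mutate x in place; the equivalence proved here is about the
-- RETURN value (B performs the same mutation).

-- x[r][c] = v  (shared by both ports: the same Python statement)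
def pvWrite (y : List (List Int)) (r c v : Int) : List (List Int) :=
  PySem.List.pySetD y r (PySem.List.pySetD (PySem.List.pyGetD y r []) c v)

-- ===== PORT A =====
-- loop state: (x, row, col, startIdx)
def setOutline (x : List (List Int)) (m : Int) (n : Int) (startRow : Int) (startCol : Int) (items : List Int) (startIdx : Int) : List (List Int) :=
  let itemLength : Int := (items.length : Int)
  let startIdx := PySem.Int.mod startIdx itemLength
  let s1 := (PySem.List.pyRange 0 m 1).foldl (fun (st : List (List Int) × Int × Int × Int) _ =>
      let col := st.2.2.1 + 1
      (pvWrite st.1 st.2.1 col (PySem.List.pyGetD items st.2.2.2 0),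
       st.2.1, col, PySem.Int.mod (st.2.2.2 + 1) itemLength)) (x, startRow, startCol, startIdx)
  if n == 1 then s1.1 else
  let s2 := (PySem.List.pyRange 1 n 1).foldl (fun (st : List (List Int) × Int × Int × Int) _ =>
      let row := st.2.1 + 1
      (pvWrite st.1 row st.2.2.1 (PySem.List.pyGetD items st.2.2.2 0),
       row, st.2.2.1, PySem.Int.mod (st.2.2.2 + 1) itemLength)) s1
  let s3 := (PySem.List.pyRange 1 m 1).foldl (fun (st : List (List Int) × Int × Int × Int) _ =>
      let col := st.2.2.1 - 1
      (pvWrite st.1 st.2.1 col (PySem.List.pyGetD items st.2.2.2 0),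
       st.2.1, col, PySem.Int.mod (st.2.2.2 + 1) itemLength)) s2
  let s4 := (PySem.List.pyRange 1 (n - 1) 1).foldl (fun (st : List (List Int) × Int × Int × Int) _ =>
      let row := st.2.1 - 1
      (pvWrite st.1 row st.2.2.1 (PySem.List.pyGetD items st.2.2.2 0),
       row, st.2.2.1, PySem.Int.mod (st.2.2.2 + 1) itemLength)) s3
  s4.1

-- ===== PORT B =====
def setOutline_alt (x : List (List Int)) (m : Int) (n : Int) (startRow : Int) (startCol : Int) (items : List Int) (startIdx : Int) : List (List Int) :=
  let L : Int := (items.length : Int)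
  let s := PySem.Int.mod startIdx L
  let L0 : Int := max m 0
  let L1 : Int := max (n - 1) 0
  let L2 : Int := max (m - 1) 0
  let L3 : Int := max (n - 2) 0
  let total : Int := if n == 1 then L0 else L0 + L1 + L2 + L3
  (PySem.List.pyRange 0 total 1).foldl (fun (y : List (List Int)) k =>
    let rc : Int × Int :=
      if k < L0 then (startRow, startCol + 1 + k)
      else if k < L0 + L1 then (startRow + (k - L0) + 1, startCol + L0)
      else if k < L0 + L1 + L2 then (startRow + L1, startCol + L0 - (k - L0 - L1) - 1)
      else (startRow + L1 - (k - L0 - L1 - L2) - 1, startCol + L0 - L2)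
    pvWrite y rc.1 rc.2 (PySem.List.pyGetD items (PySem.Int.mod (s + k) L) 0)) x

-- ===== PRECONDITION & SPEC =====
-- all cells (r, c) with c in the interval [a, b] are Python-writable in x
-- (closed form: a whole interval is in range iff its endpoints are)
def pvColsOK (x : List (List Int)) (r a b : Int) : Bool :=
  if b < a then true
  else if PySem.Raise.InRange x.length r then
    decide (-(((PySem.List.pyGetD x r []).length : Int)) ≤ a ∧
            b < ((PySem.List.pyGetD x r []).length : Int))
  else false

-- all cells (r, c) with r in the interval [a, b] are Python-writable in x
-- (the row list is only enumerated once its endpoints are known in range)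
def pvRowsOK (x : List (List Int)) (a b c : Int) : Bool :=
  if b < a then true
  else if PySem.Raise.InRange x.length a ∧ PySem.Raise.InRange x.length b then
    (PySem.List.pyRange a (b + 1) 1).all
      (fun r => decide (PySem.Raise.InRange (PySem.List.pyGetD x r []).length c))
  else false

-- Pre_ excludes exactly the inputs where the Python A raises: empty items
-- (ZeroDivisionError from `startIdx %= len(items)`) and any cell A actually
-- writes whose row or column index is out of Python range (IndexError).
def Pre_setOutline (x : List (List Int)) (m : Int) (n : Int) (startRow : Int) (startCol : Int) (items : List Int) (startIdx : Int) : Prop :=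
  items ≠ [] ∧
  (let M : Int := (m.toNat : Int)        -- iterations actually run by each loop
   let N1 : Int := ((n - 1).toNat : Int)
   let M1 : Int := ((m - 1).toNat : Int)
   let N2 : Int := ((n - 2).toNat : Int)
   pvColsOK x startRow (startCol + 1) (startCol + M) = true ∧
   (n ≠ 1 →
     pvRowsOK x (startRow + 1) (startRow + N1) (startCol + M) = true ∧
     pvColsOK x (startRow + N1) (startCol + M - M1) (startCol + M - 1) = true ∧
     pvRowsOK x (startRow + N1 - N2) (startRow + N1 - 1) (startCol + M - M1) = true))

instance (x : List (List Int)) (m : Int) (n : Int) (startRow : Int) (startCol : Int) (items : List Int) (startIdx : Int) : Decidable (Pre_setOutline x m n startRow startCol items startIdx) := by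
  unfold Pre_setOutline pvColsOK pvRowsOK; infer_instance

def pvWitness_setOutline : List (List Int) × Int × Int × Int × Int × List Int × Int :=
  ([[0, 0, 0], [0, 0, 0], [0, 0, 0]], 2, 2, 0, -1, [1, 2, 3], 0)

def Spec_setOutline (x : List (List Int)) (m : Int) (n : Int) (startRow : Int) (startCol : Int) (items : List Int) (startIdx : Int) (out : List (List Int)) : Prop := out = setOutline_alt x m n startRow startCol items startIdx
instance (x : List (List Int)) (m : Int) (n : Int) (startRow : Int) (startCol : Int) (items : List Int) (startIdx : Int) (out : List (List Int)) : Decidable (Spec_setOutline x m n startRow startCol items startIdx out) := by unfold Spec_setOutline; infer_instance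

-- ===== CLAIM (what is proved, stated in full; the proofs are below) =====
def Claim_equal_setOutline : Prop := ∀ (x : List (List Int)) (m : Int) (n : Int) (startRow : Int) (startCol : Int) (items : List Int) (startIdx : Int), Dom_setOutline x m n startRow startCol items startIdx → Pre_setOutline x m n startRow startCol items startIdx → Spec_setOutline x m n startRow startCol items startIdx (setOutline x m n startRow startCol items startIdx)

-- ===== LEMMAS AND PROOFS =====

-- one step of A's walk, direction (dr, dc)
def pvStep (items : List Int) (dr dc : Int) (st : List (List Int) × Int × Int × Int) : List (List Int) × Int × Int × Int :=
  (pvWrite st.1 (st.2.1 + dr) (st.2.2.1 + dc) (PySem.List.pyGetD items st.2.2.2 0),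
   st.2.1 + dr, st.2.2.1 + dc, PySem.Int.mod (st.2.2.2 + 1) (items.length : Int))

-- the canonical form of one outline segment: a fold of closed-form writes
def pvSeg (items : List Int) (row col dr dc s : Int) (k : Nat) (y : List (List Int)) : List (List Int) :=
  (List.range k).foldl
    (fun (y : List (List Int)) (i : Nat) =>
      pvWrite y (row + dr * ((i : Int) + 1)) (col + dc * ((i : Int) + 1))
        (PySem.List.pyGetD items (PySem.Int.mod (s + (i : Int)) (items.length : Int)) 0)) y

-- a fold whose step ignores the list element depends only on the list's length
theorem pv_foldl_ignore {α β : Type} (g : α → α) (l : List β) (init : α) :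
    l.foldl (fun s _ => g s) init = g^[l.length] init := by
  induction l generalizing init with
  | nil => rfl
  | cons b t ih => simp [List.foldl, ih, Function.iterate_succ_apply]

-- Python's % by a nonnegative modulus absorbs an inner reduction
theorem pv_mod_add (len : Nat) (a c : Int) :
    PySem.Int.mod (PySem.Int.mod a (len : Int) + c) (len : Int) = PySem.Int.mod (a + c) (len : Int) := by
  rcases Nat.eq_zero_or_pos len with h | h
  · subst h
    have h1 := PySem.Int.floordiv_mul_add_mod a 0
    have h2 := PySem.Int.floordiv_mul_add_mod (PySem.Int.mod a 0 + c) 0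
    have h3 := PySem.Int.floordiv_mul_add_mod (a + c) 0
    push_cast; omega
  · have hp : (0 : Int) < (len : Int) := by exact_mod_cast h
    simp only [PySem.Int.mod_eq_emod_of_pos hp]
    conv_lhs => rw [Int.add_emod]
    conv_rhs => rw [Int.add_emod]
    rw [Int.emod_emod_of_dvd _ dvd_rfl]

-- A's walk of one segment, in closed form
theorem pv_iter (items : List Int) (dr dc : Int) (k : Nat) (x : List (List Int)) (row col s : Int) :
    (pvStep items dr dc)^[k] (x, row, col, PySem.Int.mod s (items.length : Int)) =
    (pvSeg items row col dr dc s k x,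
     row + dr * k, col + dc * k, PySem.Int.mod (s + k) (items.length : Int)) := by
  induction k with
  | zero => simp [pvSeg]
  | succ k ih =>
    rw [Function.iterate_succ_apply', ih]
    have h1 : ((k + 1 : Nat) : Int) = (k : Int) + 1 := by push_cast; ring
    simp only [pvStep, pvSeg, List.range_succ, List.foldl_append, List.foldl_cons,
      List.foldl_nil, h1]
    rw [pv_mod_add]
    have e1 : row + dr * (k : Int) + dr = row + dr * ((k : Int) + 1) := by ring
    have e2 : col + dc * (k : Int) + dc = col + dc * ((k : Int) + 1) := by ring
    have e3 : s + (k : Int) + 1 = s + ((k : Int) + 1) := by ring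
    rw [e1, e2, e3]

-- congruence for one outline write (arguments equal as integers)
theorem pvWrite_congr (items : List Int) (acc : List (List Int)) {a b e a' b' e' : Int}
    (ha : a = a') (hb : b = b') (he : e = e') :
    pvWrite acc a b (PySem.List.pyGetD items (PySem.Int.mod e (items.length : Int)) 0)
      = pvWrite acc a' b' (PySem.List.pyGetD items (PySem.Int.mod e' (items.length : Int)) 0) := by
  rw [ha, hb, he]

-- a fold over one block of B's k-range is one segment in canonical form
theorem pv_chunkgen (items : List Int) (F : List (List Int) → Int → List (List Int))
    (p q row col dr dc s : Int) (ki : Nat) (hq : (q - p).toNat = ki)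
    (hbody : ∀ (acc : List (List Int)) (i : Nat), i < ki →
      F acc (p + (i : Int)) = pvWrite acc (row + dr * ((i : Int) + 1)) (col + dc * ((i : Int) + 1))
        (PySem.List.pyGetD items (PySem.Int.mod (s + (i : Int)) (items.length : Int)) 0)) :
    ∀ y, List.foldl F y (PySem.List.pyRange p q 1) = pvSeg items row col dr dc s ki y := by
  intro y
  rw [PySem.List.pyRange_one, hq, List.foldl_map]
  unfold pvSeg
  apply PySem.List.foldl_congr_mem
  intro acc i hi
  exact hbody acc i (List.mem_range.mp hi)

-- ===== VERDICT (by name: the statement is the Claim_ definition above) =====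
theorem setOutline_spec : Claim_equal_setOutline := by
  intro x m n startRow startCol items startIdx _ _
  unfold Spec_setOutline
  have hb1 : (fun (st : List (List Int) × Int × Int × Int) (_ : Int) =>
      (pvWrite st.1 st.2.1 (st.2.2.1 + 1) (PySem.List.pyGetD items st.2.2.2 0), st.2.1, st.2.2.1 + 1,
        PySem.Int.mod (st.2.2.2 + 1) ((items.length : Int)))) = fun st _ => pvStep items 0 1 st := by
    funext st j; simp [pvStep]
  have hb2 : (fun (st : List (List Int) × Int × Int × Int) (_ : Int) =>
      (pvWrite st.1 (st.2.1 + 1) st.2.2.1 (PySem.List.pyGetD items st.2.2.2 0), st.2.1 + 1, st.2.2.1,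
        PySem.Int.mod (st.2.2.2 + 1) ((items.length : Int)))) = fun st _ => pvStep items 1 0 st := by
    funext st j; simp [pvStep]
  have hb3 : (fun (st : List (List Int) × Int × Int × Int) (_ : Int) =>
      (pvWrite st.1 st.2.1 (st.2.2.1 - 1) (PySem.List.pyGetD items st.2.2.2 0), st.2.1, st.2.2.1 - 1,
        PySem.Int.mod (st.2.2.2 + 1) ((items.length : Int)))) = fun st _ => pvStep items 0 (-1) st := by
    funext st j; simp [pvStep, sub_eq_add_neg]
  have hb4 : (fun (st : List (List Int) × Int × Int × Int) (_ : Int) =>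
      (pvWrite st.1 (st.2.1 - 1) st.2.2.1 (PySem.List.pyGetD items st.2.2.2 0), st.2.1 - 1, st.2.2.1,
        PySem.Int.mod (st.2.2.2 + 1) ((items.length : Int)))) = fun st _ => pvStep items (-1) 0 st := by
    funext st j; simp [pvStep, sub_eq_add_neg]
  by_cases hn : n = 1
  · simp only [setOutline, setOutline_alt, hn, beq_self_eq_true, if_true]
    rw [hb1]
    simp only [pv_foldl_ignore, PySem.List.length_pyRange_one, sub_zero, pv_iter,
      zero_mul, one_mul, add_zero]
    simp only [show max m 0 = ((m.toNat : Nat) : Int) from by omega,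
      show max ((1 : Int) - 1) 0 = ((((1 : Int) - 1).toNat : Nat) : Int) from by omega,
      show max (m - 1) 0 = (((m - 1).toNat : Nat) : Int) from by omega, pv_mod_add]
    set F : List (List Int) → Int → List (List Int) := fun y k =>
      pvWrite y
        (if k < ((m.toNat : Nat) : Int) then (startRow, startCol + 1 + k)
          else
            if k < ((m.toNat : Nat) : Int) + (((1 - 1 : Int).toNat : Nat) : Int) then
              (startRow + (k - ((m.toNat : Nat) : Int)) + 1, startCol + ((m.toNat : Nat) : Int))
            else
              if k < ((m.toNat : Nat) : Int) + (((1 - 1 : Int).toNat : Nat) : Int) + (((m - 1).toNat : Nat) : Int) then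
                (startRow + (((1 - 1 : Int).toNat : Nat) : Int),
                  startCol + ((m.toNat : Nat) : Int) - (k - ((m.toNat : Nat) : Int) - (((1 - 1 : Int).toNat : Nat) : Int)) - 1)
              else
                (startRow + (((1 - 1 : Int).toNat : Nat) : Int) -
                    (k - ((m.toNat : Nat) : Int) - (((1 - 1 : Int).toNat : Nat) : Int) - (((m - 1).toNat : Nat) : Int)) - 1,
                  startCol + ((m.toNat : Nat) : Int) - (((m - 1).toNat : Nat) : Int))).1
        (if k < ((m.toNat : Nat) : Int) then (startRow, startCol + 1 + k)
          else
            if k < ((m.toNat : Nat) : Int) + (((1 - 1 : Int).toNat : Nat) : Int) then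
              (startRow + (k - ((m.toNat : Nat) : Int)) + 1, startCol + ((m.toNat : Nat) : Int))
            else
              if k < ((m.toNat : Nat) : Int) + (((1 - 1 : Int).toNat : Nat) : Int) + (((m - 1).toNat : Nat) : Int) then
                (startRow + (((1 - 1 : Int).toNat : Nat) : Int),
                  startCol + ((m.toNat : Nat) : Int) - (k - ((m.toNat : Nat) : Int) - (((1 - 1 : Int).toNat : Nat) : Int)) - 1)
              else
                (startRow + (((1 - 1 : Int).toNat : Nat) : Int) -
                    (k - ((m.toNat : Nat) : Int) - (((1 - 1 : Int).toNat : Nat) : Int) - (((m - 1).toNat : Nat) : Int)) - 1,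
                  startCol + ((m.toNat : Nat) : Int) - (((m - 1).toNat : Nat) : Int))).2
        (PySem.List.pyGetD items (PySem.Int.mod (startIdx + k) ((items.length : Nat) : Int)) 0) with hF
    have c1 := pv_chunkgen items F 0 ((m.toNat : Nat) : Int) startRow startCol 0 1 startIdx m.toNat
      (by omega)
      (by
        intro acc i hi
        rw [hF]; dsimp only
        split_ifs with h1 h2 h3
        · exact pvWrite_congr items acc (by omega) (by omega) (by omega)
        · exfalso; omega
        · exfalso; omega
        · exfalso; omega)
    rw [c1]
  · have hn' : ¬((n == 1) = true) := by simpa using hn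
    simp only [setOutline, setOutline_alt, if_neg hn']
    rw [hb1, hb2, hb3, hb4]
    simp only [pv_foldl_ignore, PySem.List.length_pyRange_one, sub_zero, pv_iter,
      zero_mul, one_mul, neg_one_mul, add_zero]
    simp only [show max m 0 = ((m.toNat : Nat) : Int) from by omega,
      show max (n - 1) 0 = (((n - 1).toNat : Nat) : Int) from by omega,
      show max (m - 1) 0 = (((m - 1).toNat : Nat) : Int) from by omega,
      show max (n - 2) 0 = (((n - 2).toNat : Nat) : Int) from by omega, pv_mod_add]
    set F : List (List Int) → Int → List (List Int) := fun y k =>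
      pvWrite y
        (if k < ((m.toNat : Nat) : Int) then (startRow, startCol + 1 + k)
          else
            if k < ((m.toNat : Nat) : Int) + (((n - 1).toNat : Nat) : Int) then
              (startRow + (k - ((m.toNat : Nat) : Int)) + 1, startCol + ((m.toNat : Nat) : Int))
            else
              if k < ((m.toNat : Nat) : Int) + (((n - 1).toNat : Nat) : Int) + (((m - 1).toNat : Nat) : Int) then
                (startRow + (((n - 1).toNat : Nat) : Int),
                  startCol + ((m.toNat : Nat) : Int) - (k - ((m.toNat : Nat) : Int) - (((n - 1).toNat : Nat) : Int)) - 1)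
              else
                (startRow + (((n - 1).toNat : Nat) : Int) -
                    (k - ((m.toNat : Nat) : Int) - (((n - 1).toNat : Nat) : Int) - (((m - 1).toNat : Nat) : Int)) - 1,
                  startCol + ((m.toNat : Nat) : Int) - (((m - 1).toNat : Nat) : Int))).1
        (if k < ((m.toNat : Nat) : Int) then (startRow, startCol + 1 + k)
          else
            if k < ((m.toNat : Nat) : Int) + (((n - 1).toNat : Nat) : Int) then
              (startRow + (k - ((m.toNat : Nat) : Int)) + 1, startCol + ((m.toNat : Nat) : Int))
            else
              if k < ((m.toNat : Nat) : Int) + (((n - 1).toNat : Nat) : Int) + (((m - 1).toNat : Nat) : Int) then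
                (startRow + (((n - 1).toNat : Nat) : Int),
                  startCol + ((m.toNat : Nat) : Int) - (k - ((m.toNat : Nat) : Int) - (((n - 1).toNat : Nat) : Int)) - 1)
              else
                (startRow + (((n - 1).toNat : Nat) : Int) -
                    (k - ((m.toNat : Nat) : Int) - (((n - 1).toNat : Nat) : Int) - (((m - 1).toNat : Nat) : Int)) - 1,
                  startCol + ((m.toNat : Nat) : Int) - (((m - 1).toNat : Nat) : Int))).2
        (PySem.List.pyGetD items (PySem.Int.mod (startIdx + k) ((items.length : Nat) : Int)) 0) with hF
    rw [PySem.List.pyRange_one_append 0 ((m.toNat : Nat) : Int)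
        (((m.toNat : Nat) : Int) + (((n - 1).toNat : Nat) : Int) + (((m - 1).toNat : Nat) : Int) + (((n - 2).toNat : Nat) : Int))
        (by omega) (by omega),
      List.foldl_append,
      PySem.List.pyRange_one_append ((m.toNat : Nat) : Int) (((m.toNat : Nat) : Int) + (((n - 1).toNat : Nat) : Int))
        (((m.toNat : Nat) : Int) + (((n - 1).toNat : Nat) : Int) + (((m - 1).toNat : Nat) : Int) + (((n - 2).toNat : Nat) : Int))
        (by omega) (by omega),
      List.foldl_append,
      PySem.List.pyRange_one_append (((m.toNat : Nat) : Int) + (((n - 1).toNat : Nat) : Int))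
        (((m.toNat : Nat) : Int) + (((n - 1).toNat : Nat) : Int) + (((m - 1).toNat : Nat) : Int))
        (((m.toNat : Nat) : Int) + (((n - 1).toNat : Nat) : Int) + (((m - 1).toNat : Nat) : Int) + (((n - 2).toNat : Nat) : Int))
        (by omega) (by omega),
      List.foldl_append]
    have c1 := pv_chunkgen items F 0 ((m.toNat : Nat) : Int) startRow startCol 0 1 startIdx m.toNat
      (by omega)
      (by
        intro acc i hi
        rw [hF]; dsimp only
        split_ifs with h1 h2 h3
        · exact pvWrite_congr items acc (by omega) (by omega) (by omega)
        · exfalso; omega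
        · exfalso; omega
        · exfalso; omega)
    have c2 := pv_chunkgen items F ((m.toNat : Nat) : Int) (((m.toNat : Nat) : Int) + (((n - 1).toNat : Nat) : Int))
      startRow (startCol + ((m.toNat : Nat) : Int)) 1 0 (startIdx + ((m.toNat : Nat) : Int)) (n - 1).toNat
      (by omega)
      (by
        intro acc i hi
        rw [hF]; dsimp only
        split_ifs with h1 h2 h3
        · exfalso; omega
        · exact pvWrite_congr items acc (by omega) (by omega) (by omega)
        · exfalso; omega
        · exfalso; omega)
    have c3 := pv_chunkgen items F (((m.toNat : Nat) : Int) + (((n - 1).toNat : Nat) : Int))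
      (((m.toNat : Nat) : Int) + (((n - 1).toNat : Nat) : Int) + (((m - 1).toNat : Nat) : Int))
      (startRow + (((n - 1).toNat : Nat) : Int)) (startCol + ((m.toNat : Nat) : Int)) 0 (-1)
      (startIdx + ((m.toNat : Nat) : Int) + (((n - 1).toNat : Nat) : Int)) (m - 1).toNat
      (by omega)
      (by
        intro acc i hi
        rw [hF]; dsimp only
        split_ifs with h1 h2 h3
        · exfalso; omega
        · exfalso; omega
        · exact pvWrite_congr items acc (by omega) (by omega) (by omega)
        · exfalso; omega)
    have c4 := pv_chunkgen items F
      (((m.toNat : Nat) : Int) + (((n - 1).toNat : Nat) : Int) + (((m - 1).toNat : Nat) : Int))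
      (((m.toNat : Nat) : Int) + (((n - 1).toNat : Nat) : Int) + (((m - 1).toNat : Nat) : Int) + (((n - 2).toNat : Nat) : Int))
      (startRow + (((n - 1).toNat : Nat) : Int)) (startCol + ((m.toNat : Nat) : Int) + -(((m - 1).toNat : Nat) : Int)) (-1) 0
      (startIdx + ((m.toNat : Nat) : Int) + (((n - 1).toNat : Nat) : Int) + (((m - 1).toNat : Nat) : Int)) (n - 1 - 1).toNat
      (by omega)
      (by
        intro acc i hi
        rw [hF]; dsimp only
        split_ifs with h1 h2 h3
        · exfalso; omega
        · exfalso; omega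
        · exfalso; omega
        · exact pvWrite_congr items acc (by omega) (by omega) (by omega))
    rw [c1, c2, c3, c4]
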